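-- pv_equiv track=rewrite | github.com/OutboardTech76/curiosityDrivenLearning | utils/action_helper.py | partial_action_2_full_action
-- ===== SOURCE A (Python) =====
-- from typing import List
--
-- def partial_action_2_full_action(x, mask):
--     """
--     Function that converts the list of actions x into
--     a larger list given the mask
--
--     Args:
--         x(List[int]): List with the actions to convet
--         mask(List[int]): List with the mask of the actions that
--                 will be added from the original list
--
--     Returns:
--         List[int]: Larger list with the contents of x but
--                 with the fields that had a 0 in mask added
--     """
--     ret: List[int] = list()
--     count:int = 0
--     for idx,v in enumerate(mask):
--         if v == 0:
--             ret.append(0)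
--         else:
--             ret.append(x[count])
--             count += 1
--     return ret
-- ===== SOURCE B (Python) =====
-- def partial_action_2_full_action(x, mask):
--     positions = [i for i, v in enumerate(mask) if v != 0]
--     ret = [0] * len(mask)
--     for j, i in enumerate(positions):
--         ret[i] = x[j]
--     return ret
-- ===== Notes on version B (the rewrite author's own statement) =====
-- stated objective: alternative
-- what changed: Replaces A's single interleaved append-loop carrying a running counter with two passes: first build the index table of nonzero mask positions, then allocate a zero-filled list and scatter x into those positions by index.
-- outside the precondition, e.g. on partial_action_2_full_action([], [1]): A raises IndexError, B raises IndexError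
import Mathlib
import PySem

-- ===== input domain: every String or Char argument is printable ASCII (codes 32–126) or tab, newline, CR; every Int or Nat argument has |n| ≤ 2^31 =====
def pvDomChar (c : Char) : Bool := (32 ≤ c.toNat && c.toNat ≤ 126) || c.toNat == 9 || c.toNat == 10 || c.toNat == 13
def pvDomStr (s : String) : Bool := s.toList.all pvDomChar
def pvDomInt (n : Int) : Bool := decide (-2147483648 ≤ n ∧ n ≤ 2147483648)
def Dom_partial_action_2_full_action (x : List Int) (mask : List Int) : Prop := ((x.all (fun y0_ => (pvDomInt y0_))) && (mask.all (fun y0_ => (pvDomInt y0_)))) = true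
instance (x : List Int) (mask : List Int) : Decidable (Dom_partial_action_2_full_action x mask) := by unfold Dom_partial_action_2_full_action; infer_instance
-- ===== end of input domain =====

-- B rebuilds A's result in two passes (nonzero-position index table, then a scatter into a
-- zero-filled list) instead of A's single interleaved append-loop with a running counter;
-- objective: alternative decomposition, same cost.


-- ===== PORT A =====
-- A's loop over mask: append 0 on a zero mask entry, else append x[count] (none = IndexError)
-- and bump count; Option threads the possible IndexError.
def pvLoopA (x : List Int) (mask : List Int) (count : Int) : Option (List Int) :=
  match mask with
  | [] => some []
  | v :: rest =>
    if v = 0 then (pvLoopA x rest count).map (0 :: ·)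
    else
      match PySem.List.pyGet? x count with
      | none => none
      | some a => (pvLoopA x rest (count + 1)).map (a :: ·)

def partial_action_2_full_action (x : List Int) (mask : List Int) : List Int :=
  (pvLoopA x mask 0).getD []

-- ===== PORT B =====
-- B's scatter pass: for (j, i) in enumerate(positions): ret[i] = x[j]; Option threads x[j]'s
-- possible IndexError (i is always a valid index of ret).
def pvScatter (x : List Int) : List (Int × Int) → List Int → Option (List Int)
  | [], ret => some ret
  | (j, i) :: rest, ret =>
    match PySem.List.pyGet? x j with
    | none => none
    | some a => pvScatter x rest (PySem.List.pySetD ret i a)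

def pvPositions (mask : List Int) : List Int :=
  ((PySem.List.enumerate mask 0).filter (fun p => p.2 != 0)).map Prod.fst

def partial_action_2_full_action_alt (x : List Int) (mask : List Int) : List Int :=
  (pvScatter x (PySem.List.enumerate (pvPositions mask) 0) (List.replicate mask.length 0)).getD []

-- ===== PRECONDITION & SPEC =====
-- Pre_ excludes exactly the inputs where A raises IndexError: mask having more nonzero
-- entries than len(x) (B raises the same IndexError there).
def Pre_partial_action_2_full_action (x : List Int) (mask : List Int) : Prop :=
  mask.countP (fun v => v != 0) ≤ x.length
instance (x : List Int) (mask : List Int) : Decidable (Pre_partial_action_2_full_action x mask) := by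
  unfold Pre_partial_action_2_full_action; infer_instance

def pvWitness_partial_action_2_full_action : List Int × List Int := ([5, 7], [0, 1, 0, 1])

def Spec_partial_action_2_full_action (x : List Int) (mask : List Int) (out : List Int) : Prop := out = partial_action_2_full_action_alt x mask
instance (x : List Int) (mask : List Int) (out : List Int) : Decidable (Spec_partial_action_2_full_action x mask out) := by unfold Spec_partial_action_2_full_action; infer_instance

-- ===== CLAIM (what is proved, stated in full; the proofs are below) =====
def Claim_equal_partial_action_2_full_action : Prop := ∀ (x : List Int) (mask : List Int), Dom_partial_action_2_full_action x mask → Pre_partial_action_2_full_action x mask → Spec_partial_action_2_full_action x mask (partial_action_2_full_action x mask)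

-- ===== LEMMAS AND PROOFS =====

-- the (j, i) pairs B's scatter pass consumes, computed structurally from mask:
-- j enumerates the nonzero entries starting at j0, b is the absolute index of the head of mask
def pvPosEnum (mask : List Int) (j b : Int) : List (Int × Int) :=
  match mask with
  | [] => []
  | v :: rest => if v = 0 then pvPosEnum rest j (b + 1) else (j, b) :: pvPosEnum rest (j + 1) (b + 1)

theorem enumerate_positions_eq_posEnum (mask : List Int) :
    ∀ (j b : Int),
      PySem.List.enumerate (((PySem.List.enumerate mask b).filter (fun p => p.2 != 0)).map Prod.fst) j
        = pvPosEnum mask j b := by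
  induction mask with
  | nil => intro j b; simp [pvPosEnum, PySem.List.enumerate_nil]
  | cons v rest ih =>
    intro j b
    by_cases hv : v = 0 <;>
      simp [pvPosEnum, PySem.List.enumerate_cons, hv, ih]

theorem set_append_cons (a b : Int) : ∀ (p t : List Int),
    (p ++ b :: t).set p.length a = p ++ a :: t := by
  intro p t
  induction p with
  | nil => simp
  | cons h p ih => simp [ih]

theorem pySetD_append_cons (a b : Int) (p t : List Int) :
    PySem.List.pySetD (p ++ b :: t) (p.length : Int) a = p ++ a :: t := by
  rw [PySem.List.pySetD_natCast, set_append_cons]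

theorem scatter_eq_loop (x : List Int) : ∀ (mask pre : List Int) (count : Int),
    pvScatter x (pvPosEnum mask count (pre.length : Int)) (pre ++ List.replicate mask.length 0)
      = (pvLoopA x mask count).map (pre ++ ·) := by
  intro mask
  induction mask with
  | nil => intro pre count; simp [pvPosEnum, pvScatter, pvLoopA]
  | cons v rest ih =>
    intro pre count
    by_cases hv : v = 0
    · have h1 : pre ++ List.replicate (v :: rest).length 0
          = (pre ++ [(0 : Int)]) ++ List.replicate rest.length 0 := by
        simp [List.replicate_succ]
      have h2 : ((pre.length : Int) + 1) = (((pre ++ [(0 : Int)]).length : Int)) := by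
        simp
      rw [pvPosEnum, if_pos hv, h1, h2, ih (pre ++ [0]) count, pvLoopA, if_pos hv,
        Option.map_map]
      congr 1
      funext l
      simp
    · rw [pvPosEnum, if_neg hv, pvLoopA, if_neg hv]
      cases hx : PySem.List.pyGet? x count with
      | none => simp [pvScatter, hx]
      | some a =>
        have hset : PySem.List.pySetD (pre ++ List.replicate (v :: rest).length 0)
            (pre.length : Int) a = (pre ++ [a]) ++ List.replicate rest.length 0 := by
          have hlen : List.replicate (v :: rest).length (0 : Int)
              = 0 :: List.replicate rest.length 0 := by
            simp [List.replicate_succ]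
          rw [hlen, pySetD_append_cons]
          simp
        rw [pvScatter]
        simp only [hx]
        have h2 : ((pre.length : Int) + 1) = (((pre ++ [a]).length : Int)) := by simp
        rw [hset, h2, ih (pre ++ [a]) (count + 1), Option.map_map]
        congr 1
        funext l
        simp

theorem alt_eq (x mask : List Int) :
    partial_action_2_full_action_alt x mask = partial_action_2_full_action x mask := by
  unfold partial_action_2_full_action_alt partial_action_2_full_action pvPositions
  rw [enumerate_positions_eq_posEnum mask 0 0]
  have h := scatter_eq_loop x mask [] 0
  simp only [List.length_nil, Int.natCast_zero, List.nil_append] at h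
  rw [h]
  cases pvLoopA x mask 0 <;> simp

-- ===== VERDICT (by name: the statement is the Claim_ definition above) =====
theorem partial_action_2_full_action_spec : Claim_equal_partial_action_2_full_action := by
  intro x mask _ _
  unfold Spec_partial_action_2_full_action
  exact (alt_eq x mask).symm
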